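-- pv_equiv track=rewrite | github.com/cognizant1503/Assignments | PF practice/44.py | check_correct_depth
-- ===== SOURCE A (Python) =====
-- def check_correct_depth(input_list, depth=0):
--     #start writing your code here
--     brac=0
--     for i in input_list:
--         if(i=='('):
--             brac+=1
--         elif(i==')'):
--             brac-=1
--         elif(i.isdigit()):
--             if(brac!=int(i)):
--                 return False
--     if(brac!=0):
--         return False
--     return True
-- ===== SOURCE B (Python) =====
-- def check_correct_depth(input_list, depth=0):
--     # Two-phase: build explicit prefix-sum depth array, then check digits / balance.
--     deltas = [(1 if s == '(' else -1 if s == ')' else 0) for s in input_list]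
--     depths = []
--     total = 0
--     for x in deltas:
--         total += x
--         depths.append(total)
--     if any(s.isdigit() and d != int(s) for s, d in zip(input_list, depths)):
--         return False
--     return total == 0
-- ===== Notes on version B (the rewrite author's own statement) =====
-- stated objective: alternative
-- what changed: Replaces A's single stateful loop with early returns by a two-phase pipeline: map elements to bracket deltas, materialise the prefix-sum depth array, then a separate any()-pass compares digits against their precomputed depth and the total balance decides the rest.
import Mathlib
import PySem

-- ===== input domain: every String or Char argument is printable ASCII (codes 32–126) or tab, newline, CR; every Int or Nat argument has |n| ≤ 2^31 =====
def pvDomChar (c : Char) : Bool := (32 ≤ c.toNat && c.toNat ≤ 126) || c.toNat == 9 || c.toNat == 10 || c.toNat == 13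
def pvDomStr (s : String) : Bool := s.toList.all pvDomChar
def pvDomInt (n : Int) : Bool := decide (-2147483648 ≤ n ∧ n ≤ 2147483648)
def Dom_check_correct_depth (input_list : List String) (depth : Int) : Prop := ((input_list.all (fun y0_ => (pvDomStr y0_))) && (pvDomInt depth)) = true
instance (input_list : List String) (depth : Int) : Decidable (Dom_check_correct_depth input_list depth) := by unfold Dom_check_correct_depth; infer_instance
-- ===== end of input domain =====

-- B replaces A's single stateful loop (early returns) by a two-phase pipeline: a prefix-sum
-- depth array built first, then a separate digit-checking pass plus a final-balance test
-- (objective: alternative decomposition, same O(n) cost).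

-- ===== PORT A =====
-- the for-loop of A with its running counter `brac` and early `return False`
def pvChkA : List String → Int → Bool
  | [], brac => if brac != 0 then false else true
  | i :: rest, brac =>
    if i == "(" then pvChkA rest (brac + 1)
    else if i == ")" then pvChkA rest (brac - 1)
    else if PySem.Str.strIsdigit i then
      if brac != (PySem.Int.ofStr? i).getD 0 then false else pvChkA rest brac
    else pvChkA rest brac

def check_correct_depth (input_list : List String) (depth : Int) : Bool :=
  pvChkA input_list 0

-- ===== PORT B =====
def pvDelta (s : String) : Int := if s == "(" then 1 else if s == ")" then -1 else 0

def check_correct_depth_alt (input_list : List String) (depth : Int) : Bool :=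
  let deltas := input_list.map pvDelta
  -- prefix sums: acc.1 is the depths list so far, acc.2 the running total
  let acc := deltas.foldl (fun (acc : List Int × Int) x => (acc.1 ++ [acc.2 + x], acc.2 + x)) ([], 0)
  if (input_list.zip acc.1).any
      (fun p => PySem.Str.strIsdigit p.1 && p.2 != (PySem.Int.ofStr? p.1).getD 0) then false
  else acc.2 == 0

-- ===== PRECONDITION & SPEC =====
def Spec_check_correct_depth (input_list : List String) (depth : Int) (out : Bool) : Prop := out = check_correct_depth_alt input_list depth
instance (input_list : List String) (depth : Int) (out : Bool) : Decidable (Spec_check_correct_depth input_list depth out) := by unfold Spec_check_correct_depth; infer_instance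

-- ===== CLAIM (what is proved, stated in full; the proofs are below) =====
def Claim_equal_check_correct_depth : Prop := ∀ (input_list : List String) (depth : Int), Dom_check_correct_depth input_list depth → Spec_check_correct_depth input_list depth (check_correct_depth input_list depth)

-- ===== LEMMAS AND PROOFS =====
def pvScan : Int → List Int → List Int
  | _, [] => []
  | b, x :: xs => (b + x) :: pvScan (b + x) xs

lemma pv_foldl_scan (l : List Int) : ∀ (init : List Int) (b : Int),
    l.foldl (fun acc x => (acc.1 ++ [acc.2 + x], acc.2 + x)) (init, b)
      = (init ++ pvScan b l, b + l.sum) := by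
  induction l with
  | nil => intro init b; simp [pvScan]
  | cons x xs ih =>
    intro init b
    simp only [List.foldl_cons, ih, pvScan, List.sum_cons, List.append_assoc,
      List.singleton_append, Prod.mk.injEq]
    exact ⟨trivial, by ring⟩

lemma pv_chkA_eq (l : List String) : ∀ (brac : Int),
    pvChkA l brac =
      (!((l.zip (pvScan brac (l.map pvDelta))).any
          (fun p => PySem.Str.strIsdigit p.1 && p.2 != (PySem.Int.ofStr? p.1).getD 0))
        && (brac + (l.map pvDelta).sum == 0)) := by
  induction l with
  | nil =>
    intro brac
    by_cases h : brac = 0 <;> simp [pvChkA, pvScan, h]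
  | cons i rest ih =>
    intro brac
    by_cases hop : i = "("
    · subst hop
      have h1 : pvDelta "(" = 1 := by decide
      have h2 : PySem.Chars.strIsdigit ['('] = false := by decide
      have hsum : brac + (1 + (rest.map pvDelta).sum) = brac + 1 + (rest.map pvDelta).sum := by
        ring
      simp [pvChkA, pvScan, h1, h2, ih, hsum]
    · by_cases hcl : i = ")"
      · subst hcl
        have h1 : pvDelta ")" = -1 := by decide
        have h2 : PySem.Chars.strIsdigit [')'] = false := by decide
        have hsum : brac + (-1 + (rest.map pvDelta).sum) = brac - 1 + (rest.map pvDelta).sum := by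
          ring
        have heq : brac + -1 = brac - 1 := by ring
        simp [pvChkA, pvScan, h1, h2, ih, hsum, heq]
      · have h1 : pvDelta i = 0 := by simp [pvDelta, hop, hcl]
        by_cases hdig : PySem.Chars.strIsdigit i.toList = true
        · by_cases hne : brac = (PySem.Int.ofStr? i).getD 0
          · simp [pvChkA, PySem.Str.strIsdigit, hop, hcl, hdig, hne, pvScan, h1, ih]
          · simp [pvChkA, PySem.Str.strIsdigit, hop, hcl, hdig, hne, pvScan, h1]
        · simp [pvChkA, PySem.Str.strIsdigit, hop, hcl, hdig, pvScan, h1, ih]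

lemma pv_alt_eq (l : List String) (d : Int) :
    check_correct_depth_alt l d =
      (!((l.zip (pvScan 0 (l.map pvDelta))).any
          (fun p => PySem.Str.strIsdigit p.1 && p.2 != (PySem.Int.ofStr? p.1).getD 0))
        && ((0 : Int) + (l.map pvDelta).sum == 0)) := by
  simp only [check_correct_depth_alt, pv_foldl_scan, List.nil_append]
  cases h : (l.zip (pvScan 0 (l.map pvDelta))).any
      (fun p => PySem.Str.strIsdigit p.1 && p.2 != (PySem.Int.ofStr? p.1).getD 0) <;>
    simp [h]

-- ===== VERDICT (by name: the statement is the Claim_ definition above) =====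
theorem check_correct_depth_spec : Claim_equal_check_correct_depth := by
  intro l d _
  unfold Spec_check_correct_depth
  rw [check_correct_depth, pv_chkA_eq, pv_alt_eq]
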